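-- pv_equiv track=rewrite | github.com/CMSCompOps/TransferTeam | AAAOps/FedProbeSendAAAMetrics/create_fedmaps.py | findXROOTDIdxes
-- ===== SOURCE A (Python) =====
-- def findXROOTDIdxes (thesite) :
--     idxes=[]
--     i=0
--     for flavor in thesite['flavors'] :
--         if flavor == 'XROOTD' : idxes.append(i)
--         i += 1
--     if len(idxes) == 0 :
--        i=0
--        for flavor in thesite['flavors'] :
--            if flavor == 'WEBDAV' : idxes.append(i)
--            i += 1
--
--     return idxes
-- ===== SOURCE B (Python) =====
-- def findXROOTDIdxes(thesite):
--     xrootd = []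
--     webdav = []
--     for i, flavor in enumerate(thesite['flavors']):
--         if flavor == 'XROOTD':
--             xrootd.append(i)
--         elif flavor == 'WEBDAV':
--             webdav.append(i)
--     return xrootd if xrootd else webdav
-- ===== Notes on version B (the rewrite author's own statement) =====
-- stated objective: simpler
-- what changed: One enumerate pass collects XROOTD and WEBDAV index lists simultaneously and selects between them afterwards, instead of A's up-to-two sequential scans with a manual counter.
import Mathlib
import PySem

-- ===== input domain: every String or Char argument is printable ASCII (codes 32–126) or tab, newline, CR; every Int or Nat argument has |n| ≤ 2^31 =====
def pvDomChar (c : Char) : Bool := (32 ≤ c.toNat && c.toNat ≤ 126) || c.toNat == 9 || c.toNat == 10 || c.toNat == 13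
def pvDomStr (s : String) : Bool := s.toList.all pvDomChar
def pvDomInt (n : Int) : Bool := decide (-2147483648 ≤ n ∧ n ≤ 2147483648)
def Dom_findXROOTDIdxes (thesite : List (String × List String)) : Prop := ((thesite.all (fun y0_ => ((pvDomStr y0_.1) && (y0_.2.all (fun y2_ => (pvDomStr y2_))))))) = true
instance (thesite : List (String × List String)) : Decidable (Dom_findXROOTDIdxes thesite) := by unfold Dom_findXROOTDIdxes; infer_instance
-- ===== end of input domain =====

-- B replaces A's up-to-two sequential scans by one enumerate pass building both index lists, then selecting; objective: simpler.


-- ===== PORT A =====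
-- A: scan for 'XROOTD' indices with a manual counter; if none found, a second scan for 'WEBDAV'.
def findXROOTDIdxes (thesite : List (String × List String)) : List Int :=
  match (PySem.Dict.mk thesite).get? "flavors" with
  | none => []   -- KeyError in Python; excluded by Pre_
  | some fs =>
    let s1 := fs.foldl (fun (s : List Int × Int) flavor =>
      (if flavor == "XROOTD" then s.1 ++ [s.2] else s.1, s.2 + 1)) ([], 0)
    let idxes := s1.1
    if idxes.length == 0 then
      (fs.foldl (fun (s : List Int × Int) flavor =>
        (if flavor == "WEBDAV" then s.1 ++ [s.2] else s.1, s.2 + 1)) ([], 0)).1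
    else idxes

-- ===== PORT B =====
-- B: one pass over enumerate(flavors) building both index lists; pick xrootd if non-empty, else webdav.
def findXROOTDIdxes_alt (thesite : List (String × List String)) : List Int :=
  match (PySem.Dict.mk thesite).get? "flavors" with
  | none => []   -- KeyError in Python; excluded by Pre_
  | some fs =>
    let r := (PySem.List.enumerate fs).foldl
      (fun (s : List Int × List Int) (p : Int × String) =>
        if p.2 == "XROOTD" then (s.1 ++ [p.1], s.2)
        else if p.2 == "WEBDAV" then (s.1, s.2 ++ [p.1])
        else s) ([], [])
    if r.1.isEmpty then r.2 else r.1

-- ===== PRECONDITION & SPEC =====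
-- Pre_ excludes exactly the inputs where thesite has no 'flavors' key, on which A raises KeyError.
def Pre_findXROOTDIdxes (thesite : List (String × List String)) : Prop :=
  ((PySem.Dict.mk thesite).get? "flavors").isSome
instance (thesite : List (String × List String)) : Decidable (Pre_findXROOTDIdxes thesite) := by unfold Pre_findXROOTDIdxes; infer_instance
def pvWitness_findXROOTDIdxes : (List (String × List String)) := [("flavors", ["SRM", "XROOTD", "WEBDAV"])]
def Spec_findXROOTDIdxes (thesite : List (String × List String)) (out : List Int) : Prop := out = findXROOTDIdxes_alt thesite
instance (thesite : List (String × List String)) (out : List Int) : Decidable (Spec_findXROOTDIdxes thesite out) := by unfold Spec_findXROOTDIdxes; infer_instance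

-- ===== CLAIM (what is proved, stated in full; the proofs are below) =====
def Claim_equal_findXROOTDIdxes : Prop := ∀ (thesite : List (String × List String)), Dom_findXROOTDIdxes thesite → Pre_findXROOTDIdxes thesite → Spec_findXROOTDIdxes thesite (findXROOTDIdxes thesite)

-- ===== LEMMAS AND PROOFS =====

-- reference index lists
def idxsOf (t : String) (fs : List String) (i : Int) : List Int :=
  match fs with
  | [] => []
  | f :: r => (if f == t then [i] else []) ++ idxsOf t r (i + 1)

theorem foldlA_eq (t : String) (fs : List String) (acc : List Int) (i : Int) :
    (fs.foldl (fun (s : List Int × Int) flavor =>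
      (if flavor == t then s.1 ++ [s.2] else s.1, s.2 + 1)) (acc, i)).1
      = acc ++ idxsOf t fs i := by
  induction fs generalizing acc i with
  | nil => simp [idxsOf]
  | cons f r ih =>
    by_cases h : (f == t) = true
    · simp only [List.foldl_cons, idxsOf, h, if_true]
      rw [ih]; simp
    · simp only [List.foldl_cons, idxsOf, h, if_false]
      rw [ih]; simp

theorem foldlA_eq' (t : String) (fs : List String) :
    (fs.foldl (fun (s : List Int × Int) flavor =>
      (if flavor == t then s.1 ++ [s.2] else s.1, s.2 + 1)) ([], 0)).1
      = idxsOf t fs 0 := by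
  simpa using foldlA_eq t fs [] 0

theorem foldlB_eq (fs : List String) (xr wd : List Int) (i : Int) :
    (PySem.List.enumerate fs i).foldl
      (fun (s : List Int × List Int) (p : Int × String) =>
        if p.2 == "XROOTD" then (s.1 ++ [p.1], s.2)
        else if p.2 == "WEBDAV" then (s.1, s.2 ++ [p.1])
        else s) (xr, wd)
      = (xr ++ idxsOf "XROOTD" fs i, wd ++ idxsOf "WEBDAV" fs i) := by
  induction fs generalizing xr wd i with
  | nil => simp [PySem.List.enumerate_nil, idxsOf]
  | cons f r ih =>
    rw [PySem.List.enumerate_cons]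
    simp only [List.foldl_cons, idxsOf]
    by_cases hx : (f == "XROOTD") = true
    · have hxw : (f == "WEBDAV") = false := by
        have : f = "XROOTD" := by simpa using hx
        simp [this]
      simp only [hx, hxw, if_true, if_false]
      rw [ih]; simp
    · by_cases hw : (f == "WEBDAV") = true
      · simp only [hx, hw, if_true, if_false, Bool.false_eq_true]
        rw [ih]; simp
      · simp only [hx, hw, if_false, Bool.false_eq_true]
        rw [ih]; simp

-- ===== VERDICT (by name: the statement is the Claim_ definition above) =====
theorem findXROOTDIdxes_spec : Claim_equal_findXROOTDIdxes := by
  intro thesite _ _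
  unfold Spec_findXROOTDIdxes findXROOTDIdxes findXROOTDIdxes_alt
  cases (PySem.Dict.mk thesite).get? "flavors" with
  | none => rfl
  | some fs =>
    simp only [foldlA_eq', foldlB_eq fs [] [] 0, List.nil_append]
    by_cases h : (idxsOf "XROOTD" fs 0) = []
    · simp [h]
    · simp [h, List.isEmpty_iff, List.length_eq_zero_iff]
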